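-- pv_equiv track=rewrite | github.com/akhandsingh17/assignments | codingexercise/PairSumTwoArray.py | PairSumTwoArray
-- ===== SOURCE A (Python) =====
-- def PairSumTwoArray(a1,a2,k):
--
--     dict={}
--
--     for l in a1:
--         if l not in dict.keys():
--             dict[l]=1
--
--     fnl_lst=[]
--     for l in a2:
--         diff=k-l
--         if diff in dict.keys():
--             tup=(diff,l)
--             fnl_lst.append(tup)
--
--     return fnl_lst
-- ===== SOURCE B (Python) =====
-- def PairSumTwoArray(a1, a2, k):
--     # Sort a1 once, then decide membership of k-l by recursive binary search
--     # over index bounds [lo, hi) on the sorted list; build the result as a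
--     # comprehension over a2.
--     s = sorted(a1)
--
--     def _has(lo, hi, x):
--         if lo >= hi:
--             return False
--         m = (lo + hi) // 2
--         v = s[m]
--         if v == x:
--             return True
--         if x < v:
--             return _has(lo, m, x)
--         return _has(m + 1, hi, x)
--
--     return [(k - l, l) for l in a2 if _has(0, len(s), k - l)]
-- ===== Notes on version B (the rewrite author's own statement) =====
-- stated objective: alternative
-- what changed: Replaces A's hash-table (dict) membership index with sort-then-binary-search: a1 is sorted once and each k-l is located by a recursive binary search over index bounds on the sorted list, the result built as a comprehension over a2.
import Mathlib
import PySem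

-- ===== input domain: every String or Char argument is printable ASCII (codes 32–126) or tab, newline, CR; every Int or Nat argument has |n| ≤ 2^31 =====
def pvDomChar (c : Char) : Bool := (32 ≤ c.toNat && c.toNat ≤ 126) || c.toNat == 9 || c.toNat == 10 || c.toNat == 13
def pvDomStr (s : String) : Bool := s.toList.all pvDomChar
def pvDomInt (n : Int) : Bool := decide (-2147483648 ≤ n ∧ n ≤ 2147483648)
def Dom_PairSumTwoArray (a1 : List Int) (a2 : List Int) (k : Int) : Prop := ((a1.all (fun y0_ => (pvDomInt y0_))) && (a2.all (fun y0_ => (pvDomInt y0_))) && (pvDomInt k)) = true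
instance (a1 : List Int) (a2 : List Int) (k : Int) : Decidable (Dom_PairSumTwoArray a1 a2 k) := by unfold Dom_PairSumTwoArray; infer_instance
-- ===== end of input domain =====

-- B replaces A's dict membership index by sort-then-binary-search: a1 is sorted once and each
-- k-l is located by recursive binary search over index bounds; same return value, no speed claim.

-- ===== PORT A =====
def PairSumTwoArray (a1 : List Int) (a2 : List Int) (k : Int) : List (Int × Int) :=
  let d : PySem.Dict Int Int :=
    a1.foldl (fun d l => if d.contains l = true then d else d.insert l 1) PySem.Dict.empty
  a2.foldl (fun acc l =>
    let diff := k - l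
    if d.contains diff = true then acc ++ [(diff, l)] else acc) []

-- ===== PORT B =====
-- '_has(lo, hi, x)': recursive binary search over index bounds [lo, hi) on s;
-- Python's locals m = (lo+hi)//2 and v = s[m] are inlined (m is in range on every call B makes)
def pvHas (s : List Int) (lo hi x : Int) : Bool :=
  if lo ≥ hi then false
  else if (PySem.List.pyGet? s (PySem.Int.floordiv (lo + hi) 2)).getD 0 = x then true
  else if x < (PySem.List.pyGet? s (PySem.Int.floordiv (lo + hi) 2)).getD 0 then
    pvHas s lo (PySem.Int.floordiv (lo + hi) 2) x
  else
    pvHas s (PySem.Int.floordiv (lo + hi) 2 + 1) hi x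
termination_by (hi - lo).toNat
decreasing_by
  all_goals
    simp only [PySem.Int.floordiv_eq_ediv_of_pos (by norm_num : (0:Int) < 2)] at *
    omega

def PairSumTwoArray_alt (a1 : List Int) (a2 : List Int) (k : Int) : List (Int × Int) :=
  let s := PySem.List.sorted a1 (fun x => x) false
  a2.flatMap (fun l => if pvHas s 0 (s.length : Int) (k - l) = true then [(k - l, l)] else [])

-- ===== PRECONDITION & SPEC =====
def Spec_PairSumTwoArray (a1 : List Int) (a2 : List Int) (k : Int) (out : List (Int × Int)) : Prop := out = PairSumTwoArray_alt a1 a2 k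
instance (a1 : List Int) (a2 : List Int) (k : Int) (out : List (Int × Int)) : Decidable (Spec_PairSumTwoArray a1 a2 k out) := by unfold Spec_PairSumTwoArray; infer_instance

-- ===== CLAIM =====
def Claim_equal_PairSumTwoArray : Prop := ∀ (a1 : List Int) (a2 : List Int) (k : Int), Dom_PairSumTwoArray a1 a2 k → Spec_PairSumTwoArray a1 a2 k (PairSumTwoArray a1 a2 k)

-- ===== LEMMAS AND PROOFS =====

-- A's first loop: the dict built from a1 contains v iff v ∈ a1
theorem contains_foldl_mem (a1 : List Int) (d : PySem.Dict Int Int) (v : Int) :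
    (a1.foldl (fun d l => if d.contains l = true then d else d.insert l 1) d).contains v
      = (d.contains v || decide (v ∈ a1)) := by
  induction a1 generalizing d with
  | nil => simp
  | cons x rest ih =>
    simp only [List.foldl_cons]
    by_cases hx : d.contains x = true
    · rw [if_pos hx, ih]
      by_cases hvx : v = x
      · subst hvx; simp [hx]
      · simp [hvx]
    · rw [if_neg hx, ih, PySem.Dict.contains_insert]
      by_cases hvx : v = x
      · subst hvx; simp [hx]
      · rw [beq_eq_false_iff_ne.mpr hvx]; simp [hvx]

-- binary search on [lo, hi) of the sorted list finds x iff some index there holds x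
theorem pvHas_spec (a1 : List Int) (lo hi x : Int) (hlo : 0 ≤ lo)
    (hhi : hi ≤ ((PySem.List.sorted a1 (fun y => y) false).length : Int)) :
    pvHas (PySem.List.sorted a1 (fun y => y) false) lo hi x = true ↔
      ∃ i : Nat, (lo ≤ (i : Int) ∧ (i : Int) < hi) ∧
        ∃ h : i < (PySem.List.sorted a1 (fun y => y) false).length,
          (PySem.List.sorted a1 (fun y => y) false)[i] = x := by
  rw [pvHas]
  by_cases hge : lo ≥ hi
  · rw [if_pos hge]
    simp only [Bool.false_eq_true, false_iff]
    rintro ⟨i, ⟨h1, h2⟩, -⟩; omega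
  · rw [if_neg hge]
    have hmb : lo ≤ PySem.Int.floordiv (lo + hi) 2 ∧ PySem.Int.floordiv (lo + hi) 2 < hi := by
      rw [PySem.Int.floordiv_eq_ediv_of_pos (by norm_num : (0:Int) < 2)]
      omega
    set s := PySem.List.sorted a1 (fun y => y) false with hs
    set m := PySem.Int.floordiv (lo + hi) 2 with hm
    have hmnat : m.toNat < s.length := by omega
    have hmc : m = ((m.toNat : Nat) : Int) := by omega
    have hv : (PySem.List.pyGet? s m).getD 0 = s[m.toNat] := by
      conv_lhs => rw [hmc]
      rw [PySem.List.pyGet?_natCast, List.getElem?_eq_getElem hmnat]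
      rfl
    rw [hv]
    by_cases hvx : s[m.toNat] = x
    · rw [if_pos hvx]
      simp only [true_iff]
      exact ⟨m.toNat, ⟨by omega, by omega⟩, hmnat, hvx⟩
    · rw [if_neg hvx]
      by_cases hlt : x < s[m.toNat]
      · rw [if_pos hlt, hs, pvHas_spec a1 lo m x hlo (by rw [← hs]; exact_mod_cast le_of_lt (lt_of_lt_of_le hmb.2 hhi))]
        rw [← hs]
        constructor
        · rintro ⟨i, ⟨h1, h2⟩, hl, hx⟩
          exact ⟨i, ⟨h1, by omega⟩, hl, hx⟩
        · rintro ⟨i, ⟨h1, h2⟩, hl, hx⟩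
          refine ⟨i, ⟨h1, ?_⟩, hl, hx⟩
          by_contra hge'
          have hle : m.toNat ≤ i := by omega
          have hmono : s[m.toNat] ≤ s[i] := PySem.List.sorted_id_getElem_mono a1 hle hl
          rw [hx] at hmono
          omega
      · have hgt : s[m.toNat] < x := lt_of_le_of_ne (not_lt.mp hlt) hvx
        rw [if_neg hlt, hs, pvHas_spec a1 (m + 1) hi x (by omega) (by rw [← hs]; exact hhi)]
        rw [← hs]
        constructor
        · rintro ⟨i, ⟨h1, h2⟩, hl, hx⟩
          exact ⟨i, ⟨by omega, h2⟩, hl, hx⟩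
        · rintro ⟨i, ⟨h1, h2⟩, hl, hx⟩
          refine ⟨i, ⟨?_, h2⟩, hl, hx⟩
          by_contra hlt'
          have hle : i ≤ m.toNat := by omega
          have hmono : s[i] ≤ s[m.toNat] := PySem.List.sorted_id_getElem_mono a1 hle hmnat
          rw [hx] at hmono
          omega
termination_by (hi - lo).toNat
decreasing_by
  all_goals
    simp only [hm, PySem.Int.floordiv_eq_ediv_of_pos (by norm_num : (0:Int) < 2)] at *
    omega

-- over the full index range, binary search decides membership
theorem pvHas_mem (a1 : List Int) (x : Int) :
    pvHas (PySem.List.sorted a1 (fun y => y) false) 0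
      ((PySem.List.sorted a1 (fun y => y) false).length : Int) x = true ↔
      x ∈ PySem.List.sorted a1 (fun y => y) false := by
  rw [pvHas_spec a1 _ _ x le_rfl le_rfl, List.mem_iff_getElem]
  constructor
  · rintro ⟨i, -, hl, hx⟩; exact ⟨i, hl, hx⟩
  · rintro ⟨i, hl, hx⟩; exact ⟨i, ⟨by omega, by exact_mod_cast hl⟩, hl, hx⟩

-- ===== VERDICT =====
theorem PairSumTwoArray_spec : Claim_equal_PairSumTwoArray := by
  intro a1 a2 k _
  unfold Spec_PairSumTwoArray PairSumTwoArray PairSumTwoArray_alt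
  simp only
  rw [← List.nil_append (List.flatMap _ a2), ← PySem.List.foldl_append_eq_flatMap]
  apply PySem.List.foldl_congr_mem
  intro acc l _
  rw [contains_foldl_mem]
  by_cases h : (k - l) ∈ a1
  · have hb : pvHas (PySem.List.sorted a1 (fun x => x) false) 0
        ((PySem.List.sorted a1 (fun x => x) false).length : Int) (k - l) = true :=
      (pvHas_mem a1 (k - l)).mpr (by rw [PySem.List.mem_sorted]; exact h)
    rw [PySem.List.length_sorted] at hb
    simp [h, hb]
  · have hb : pvHas (PySem.List.sorted a1 (fun x => x) false) 0
        ((PySem.List.sorted a1 (fun x => x) false).length : Int) (k - l) = false := by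
      rw [Bool.eq_false_iff]
      intro hc
      exact h (by rw [← PySem.List.mem_sorted (key := fun x => x) (rev := false)]; exact (pvHas_mem a1 (k - l)).mp hc)
    rw [PySem.List.length_sorted] at hb
    simp [h, hb]
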